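-- pv_equiv track=rewrite | github.com/mittgaurav/Pietone | array_problems.py | nth_compartment_rev
-- ===== SOURCE A (Python) =====
-- def nth_compartment_rev(size, N):
--     """reverse every nth
--     compartment in train"""
--     if size < N:  # wrap-around
--         N %= size
--
--     if N == 1:  # elems stay in place
--         return list(range(1, size + 1))
--     if size == N:  # reverse every elem
--         return list(range(size, 0, -1))
--
--     ret = list(range(1, size+1))
--     i = 0
--     while i < size - N + 1:
--         ii = i
--         j = i + N - 1
--         while i < j:
--             ret[i], ret[j] = ret[j], ret[i]
--             i += 1
--             j -= 1
--         i = ii + N  # move i to next batch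
--
--     return ret
-- ===== SOURCE B (Python) =====
-- def nth_compartment_rev(size, N):
--     """reverse every nth compartment in train"""
--     if size < N:  # wrap-around
--         N %= size
--     nums = list(range(1, size + 1))
--     out = []
--     for i in range(0, len(nums), N):
--         block = nums[i:i + N]
--         if len(block) == N:
--             block.reverse()
--         out.extend(block)
--     return out
-- ===== Notes on version B (the rewrite author's own statement) =====
-- stated objective: simpler
-- what changed: Replaced A's special-case branches (N==1, size==N) and its in-place two-pointer swap loop by a single forward pass that slices each N-sized chunk and reverses full chunks before appending.
-- outside the precondition, e.g. on nth_compartment_rev(-2, 2): A returns [], B raises ValueError; on nth_compartment_rev(0, 0): A returns [], B raises ValueError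
import Mathlib
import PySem

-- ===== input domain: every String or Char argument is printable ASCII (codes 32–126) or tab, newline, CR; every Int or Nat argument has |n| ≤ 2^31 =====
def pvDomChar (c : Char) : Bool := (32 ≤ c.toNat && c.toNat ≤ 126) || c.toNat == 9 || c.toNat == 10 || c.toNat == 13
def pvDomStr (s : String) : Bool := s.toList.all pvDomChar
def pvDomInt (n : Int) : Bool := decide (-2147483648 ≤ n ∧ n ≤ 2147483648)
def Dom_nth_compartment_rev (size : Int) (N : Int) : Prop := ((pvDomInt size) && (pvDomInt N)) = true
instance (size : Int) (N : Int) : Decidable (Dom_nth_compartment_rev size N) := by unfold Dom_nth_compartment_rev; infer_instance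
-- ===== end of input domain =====

-- B replaces A's special-case branches and in-place two-pointer swap loop by one forward
-- chunk-slice-and-reverse pass (objective: simpler); equal on Pre_, proved below.

-- ===== PORT A =====
-- inner `while i < j: ret[i], ret[j] = ret[j], ret[i]; i += 1; j -= 1`
def pvSwapLoop (ret : List Int) (i j : Int) : List Int :=
  if _h : i < j then
    pvSwapLoop
      (PySem.List.pySetD (PySem.List.pySetD ret i (PySem.List.pyGetD ret j 0)) j
        (PySem.List.pyGetD ret i 0))
      (i + 1) (j - 1)
  else ret
termination_by (j - i).toNat
decreasing_by omega

-- outer `while i < size - N + 1` loop; the fuel only makes the recursion total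
-- (inside Pre_ the loop runs at most size.toNat times, so the fuel never runs out)
def pvOuterLoop (size N : Int) : Nat → Int → List Int → List Int
  | 0, _, ret => ret
  | fuel + 1, i, ret =>
    if i < size - N + 1 then
      pvOuterLoop size N fuel (i + N) (pvSwapLoop ret i (i + N - 1))
    else ret

def nth_compartment_rev (size : Int) (N : Int) : List Int :=
  let N := if size < N then PySem.Int.mod N size else N
  if N = 1 then PySem.List.pyRange 1 (size + 1) 1
  else if size = N then PySem.List.pyRange size 0 (-1)
  else pvOuterLoop size N (size.toNat + 1) 0 (PySem.List.pyRange 1 (size + 1) 1)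

-- ===== PORT B =====
def nth_compartment_rev_alt (size : Int) (N : Int) : List Int :=
  let N := if size < N then PySem.Int.mod N size else N
  let nums := PySem.List.pyRange 1 (size + 1) 1
  (PySem.List.pyRange 0 (nums.length : Int) N).foldl
    (fun out i =>
      let block := PySem.List.slice nums (some i) (some (i + N))
      let block := if (block.length : Int) = N then block.reverse else block
      out ++ block) []

-- ===== PRECONDITION & SPEC =====
-- Pre_ excludes: size = 0 with N > 0 (A raises ZeroDivisionError on `N %= size`);
-- N ≤ 0 after the wrap with size > 0, and N ≤ 0 ≠ size without wrap (A loops forever);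
-- and the corner where the wrapped N is 0 with size < 0 (and size = N = 0), where A's
-- loop body never runs and it returns [] while B's zero range step raises ValueError.
def Pre_nth_compartment_rev (size : Int) (N : Int) : Prop :=
  (size < N → size ≠ 0 ∧ PySem.Int.mod N size ≠ 0) ∧
  (¬ size < N → (1 ≤ N ∨ size = N)) ∧
  ¬ (size = 0 ∧ N = 0)
instance (size : Int) (N : Int) : Decidable (Pre_nth_compartment_rev size N) := by
  unfold Pre_nth_compartment_rev; infer_instance

def pvWitness_nth_compartment_rev : Int × Int := (7, 3)

def Spec_nth_compartment_rev (size : Int) (N : Int) (out : List Int) : Prop := out = nth_compartment_rev_alt size N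
instance (size : Int) (N : Int) (out : List Int) : Decidable (Spec_nth_compartment_rev size N out) := by unfold Spec_nth_compartment_rev; infer_instance

-- ===== CLAIM (what is proved, stated in full; the proofs are below) =====
def Claim_equal_nth_compartment_rev : Prop := ∀ (size : Int) (N : Int), Dom_nth_compartment_rev size N → Pre_nth_compartment_rev size N → Spec_nth_compartment_rev size N (nth_compartment_rev size N)

-- ===== LEMMAS AND PROOFS =====

-- common reference function: reverse each full leading chunk of N, leave a short tail alone
def pvChunks (N : Nat) (l : List Int) : List Int :=
  if _h : l = [] ∨ N = 0 then l
  else if N ≤ l.length then (l.take N).reverse ++ pvChunks N (l.drop N)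
  else l
termination_by l.length
decreasing_by simp_all; omega

lemma pvChunks_nil (N : Nat) : pvChunks N [] = [] := by
  unfold pvChunks; simp

lemma pvChunks_short (N : Nat) (l : List Int) (h : l.length < N) : pvChunks N l = l := by
  unfold pvChunks
  split
  · rfl
  · rw [if_neg (by omega)]

lemma pvChunks_step (N : Nat) (l : List Int) (hl : l ≠ []) (hN : 0 < N) (h : N ≤ l.length) :
    pvChunks N l = (l.take N).reverse ++ pvChunks N (l.drop N) := by
  conv_lhs => rw [pvChunks]
  rw [dif_neg (by simp [hl]; omega), if_pos h]

lemma pvChunks_one : ∀ (l : List Int), pvChunks 1 l = l := by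
  intro l
  induction l with
  | nil => exact pvChunks_nil 1
  | cons x t IH =>
    rw [pvChunks_step 1 (x :: t) (by simp) one_pos (by simp)]
    simp [IH]

lemma pyRange_pos_cons (a b s : Int) (hab : a < b) (hs : 0 < s) :
    PySem.List.pyRange a b s = a :: PySem.List.pyRange (a + s) b s := by
  rw [PySem.List.pyRange_of_pos a b hs, PySem.List.pyRange_of_pos (a + s) b hs, if_pos hab]
  have hdiv : (b - a + s - 1) / s = (b - (a + s) + s - 1) / s + 1 := by
    have h1 : b - a + s - 1 = (b - (a + s) + s - 1) + 1 * s := by ring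
    rw [h1, Int.add_mul_ediv_right _ _ (ne_of_gt hs)]
  by_cases hab2 : a + s < b
  · rw [if_pos hab2]
    have h0 : 0 ≤ (b - (a + s) + s - 1) / s := Int.ediv_nonneg (by omega) (le_of_lt hs)
    rw [show ((b - a + s - 1) / s).toNat = ((b - (a + s) + s - 1) / s).toNat + 1 by omega]
    rw [List.range_succ_eq_map, List.map_cons, List.map_map]
    congr 1
    · simp
    · congr 1
      funext k
      simp only [Function.comp_apply]
      push_cast
      ring
  · rw [if_neg hab2]
    have hy : (b - (a + s) + s - 1) / s = 0 :=
      Int.ediv_eq_zero_of_lt (by omega) (by omega)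
    rw [show ((b - a + s - 1) / s).toNat = 1 by omega]
    simp [List.range_one]

lemma pyRange_pos_nil (a b s : Int) (hab : b ≤ a) (hs : 0 < s) :
    PySem.List.pyRange a b s = [] := by
  rw [PySem.List.pyRange_of_pos a b hs, if_neg (by omega)]
  simp

lemma getD_set (l : List Int) (m k : Nat) (v : Int) :
    (l.set m v).getD k 0 = if m = k ∧ m < l.length then v else l.getD k 0 := by
  by_cases hmk : m = k
  · subst hmk
    by_cases hlt : m < l.length
    · simp [List.getD_eq_getElem?_getD, hlt]
    · simp [List.getD_eq_getElem?_getD, hlt]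
  · simp [List.getD_eq_getElem?_getD, hmk]

lemma swapLoop_len (ret : List Int) (i j : Int) :
    (pvSwapLoop ret i j).length = ret.length := by
  fun_induction pvSwapLoop ret i j <;> simp_all [PySem.List.length_pySetD]

lemma swapLoop_getD : ∀ (n : Nat) (ret : List Int) (i j : Int), (j - i).toNat ≤ n →
    0 ≤ i → i ≤ j + 1 → j < (ret.length : Int) →
    ∀ (k : Nat),
      (pvSwapLoop ret i j).getD k 0
        = if i ≤ (k : Int) ∧ (k : Int) ≤ j then ret.getD (i + j - k).toNat 0
          else ret.getD k 0 := by
  intro n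
  induction n with
  | zero =>
    intro ret i j hn hi hij hj k
    rw [pvSwapLoop, dif_neg (by omega : ¬ i < j)]
    split_ifs with hk
    · rw [show (i + j - (k : Int)).toNat = k by omega]
    · rfl
  | succ n IH =>
    intro ret i j hn hi hij hj k
    by_cases hlt : i < j
    · rw [pvSwapLoop, dif_pos hlt]
      set a := PySem.List.pyGetD ret j 0 with ha
      set b := PySem.List.pyGetD ret i 0 with hb
      set ret' := PySem.List.pySetD (PySem.List.pySetD ret i a) j b with hret'
      have hgj : (0 : Int) ≤ j := by omega
      have hlen' : ret'.length = ret.length := by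
        rw [hret', PySem.List.length_pySetD, PySem.List.length_pySetD]
      rw [IH ret' (i + 1) (j - 1) (by omega) (by omega) (by omega)
        (by rw [hlen']; omega)]
      have hretm : ∀ (m : Nat), ret'.getD m 0 =
          if m = j.toNat then ret.getD i.toNat 0
          else if m = i.toNat then ret.getD j.toNat 0
          else ret.getD m 0 := by
        intro m
        rw [hret', PySem.List.pySetD_of_nonneg _ _ hi, PySem.List.pySetD_of_nonneg _ _ hgj]
        rw [getD_set, getD_set]
        rw [ha, hb, PySem.List.pyGetD_of_nonneg _ _ hgj, PySem.List.pyGetD_of_nonneg _ _ hi]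
        simp only [List.length_set]
        split_ifs <;> first | rfl | omega
      simp only [hretm]
      split_ifs <;> first | rfl | omega | (congr 1; omega)
    · rw [pvSwapLoop, dif_neg hlt]
      split_ifs with hk
      · rw [show (i + j - (k : Int)).toNat = k by omega]
      · rfl

lemma swapLoop_eq (ret : List Int) (i N : Int) (hi : 0 ≤ i) (hN : 0 < N)
    (hle : i + N ≤ (ret.length : Int)) :
    pvSwapLoop ret i (i + N - 1)
      = ret.take i.toNat ++ ((ret.drop i.toNat).take N.toNat).reverse
          ++ ret.drop (i + N).toNat := by
  have hlenL : (pvSwapLoop ret i (i + N - 1)).length = ret.length := swapLoop_len ret i (i + N - 1)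
  have hmidlen : ((ret.drop i.toNat).take N.toNat).length = N.toNat := by
    simp [List.length_take, List.length_drop]
    omega
  have htl : (ret.take i.toNat).length = i.toNat := by
    simp [List.length_take]
    omega
  apply List.ext_getElem?
  intro k
  by_cases hkr : k < ret.length
  · have hg := swapLoop_getD (i + N - 1 - i).toNat ret i (i + N - 1) le_rfl hi (by omega)
      (by omega) k
    rw [List.getD_eq_getElem?_getD, List.getElem?_eq_getElem (by omega), Option.getD_some] at hg
    rw [List.getElem?_eq_getElem (show k < (pvSwapLoop ret i (i + N - 1)).length from by omega),
      hg, List.append_assoc, List.getElem?_append, htl]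
    by_cases hk_lo : k < i.toNat
    · rw [if_neg (show ¬(i ≤ (k : Int) ∧ (k : Int) ≤ i + N - 1) from by omega),
        if_pos hk_lo, List.getElem?_take, if_pos hk_lo,
        List.getElem?_eq_getElem hkr,
        List.getD_eq_getElem?_getD, List.getElem?_eq_getElem hkr, Option.getD_some]
    · by_cases hk_mid : k - i.toNat < N.toNat
      · rw [if_pos (show i ≤ (k : Int) ∧ (k : Int) ≤ i + N - 1 from by constructor <;> omega),
          if_neg hk_lo, List.getElem?_append, List.length_reverse, hmidlen, if_pos hk_mid,
          List.getElem?_reverse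
            (show k - i.toNat < ((ret.drop i.toNat).take N.toNat).length from by
              rw [hmidlen]; omega),
          hmidlen, List.getElem?_take,
          if_pos (show N.toNat - 1 - (k - i.toNat) < N.toNat from by omega),
          List.getElem?_drop,
          List.getElem?_eq_getElem
            (show i.toNat + (N.toNat - 1 - (k - i.toNat)) < ret.length from by omega),
          List.getD_eq_getElem?_getD,
          List.getElem?_eq_getElem
            (show (i + (i + N - 1) - (k : Int)).toNat < ret.length from by omega),
          Option.getD_some]
        simp only [show (i + (i + N - 1) - (k : Int)).toNat
          = i.toNat + (N.toNat - 1 - (k - i.toNat)) from by omega]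
      · rw [if_neg (show ¬(i ≤ (k : Int) ∧ (k : Int) ≤ i + N - 1) from by omega),
          if_neg hk_lo, List.getElem?_append, List.length_reverse, hmidlen, if_neg hk_mid,
          List.getElem?_drop,
          List.getElem?_eq_getElem
            (show (i + N).toNat + (k - i.toNat - N.toNat) < ret.length from by omega),
          List.getD_eq_getElem?_getD, List.getElem?_eq_getElem hkr, Option.getD_some]
        simp only [show (i + N).toNat + (k - i.toNat - N.toNat) = k from by omega]
  · rw [List.getElem?_eq_none (by omega : (pvSwapLoop ret i (i + N - 1)).length ≤ k),
      List.getElem?_eq_none (by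
        simp [List.length_append, List.length_take, List.length_drop]
        omega)]

lemma outerLoop_eq (size N : Int) (hN : 0 < N) :
    ∀ (fuel : Nat) (i : Int) (ret : List Int), 0 ≤ i →
      ret.length = size.toNat → (size - i).toNat ≤ fuel * N.toNat →
      pvOuterLoop size N fuel i ret
        = ret.take i.toNat ++ pvChunks N.toNat (ret.drop i.toNat) := by
  intro fuel
  induction fuel with
  | zero =>
    intro i ret hi hlen hf
    have hdrop : ret.drop i.toNat = [] := by
      apply List.drop_eq_nil_of_le
      omega
    simp only [pvOuterLoop]
    rw [hdrop, pvChunks_nil, List.append_nil, List.take_of_length_le (by omega)]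
  | succ fuel IH =>
    intro i ret hi hlen hf
    by_cases hcond : i < size - N + 1
    · have hiN : i + N ≤ size := by omega
      simp only [pvOuterLoop]
      rw [if_pos hcond, swapLoop_eq ret i N hi hN (by omega)]
      set A := ret.take i.toNat with hA
      set B := ((ret.drop i.toNat).take N.toNat).reverse with hB
      set C := ret.drop (i + N).toNat with hC
      have hAlen : A.length = i.toNat := by rw [hA]; simp [List.length_take]; omega
      have hBlen : B.length = N.toNat := by
        rw [hB]; simp [List.length_take, List.length_drop]; omega
      have hClen : C.length = ret.length - (i + N).toNat := by rw [hC]; simp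
      rw [IH (i + N) (A ++ B ++ C) (by omega)
        (by simp [hAlen, hBlen, hClen]; omega)
        (by
          have hexp : (fuel + 1) * N.toNat = fuel * N.toNat + N.toNat := by ring
          omega)]
      have htake : (A ++ B ++ C).take (i + N).toNat = A ++ B :=
        List.take_left' (by simp [hAlen, hBlen]; omega)
      have hdrop : (A ++ B ++ C).drop (i + N).toNat = C :=
        List.drop_left' (by simp [hAlen, hBlen]; omega)
      rw [htake, hdrop]
      have hlne : ret.drop i.toNat ≠ [] := by
        apply List.ne_nil_of_length_pos
        simp [List.length_drop]
        omega
      rw [pvChunks_step N.toNat (ret.drop i.toNat) hlne (by omega)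
        (by simp [List.length_drop]; omega)]
      rw [List.drop_drop, show i.toNat + N.toNat = (i + N).toNat from by omega]
      rw [← hB, ← hC, List.append_assoc]
    · simp only [pvOuterLoop]
      rw [if_neg hcond]
      have hshort : (ret.drop i.toNat).length < N.toNat := by
        simp [List.length_drop]
        omega
      rw [pvChunks_short _ _ hshort, List.take_append_drop]

-- B's fold over range(i, size, N) equals pvChunks of the suffix from i
lemma foldB_eq (size N : Int) (hN : 0 < N) (nums : List Int)
    (hlen : nums.length = size.toNat) :
    ∀ (fuelm : Nat) (i : Int), 0 ≤ i → (size - i).toNat ≤ fuelm → ∀ (out : List Int),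
      (PySem.List.pyRange i size N).foldl
        (fun out i =>
          out ++
            (if ((PySem.List.slice nums (some i) (some (i + N))).length : Int) = N
              then (PySem.List.slice nums (some i) (some (i + N))).reverse
              else PySem.List.slice nums (some i) (some (i + N)))) out
      = out ++ pvChunks N.toNat (nums.drop i.toNat) := by
  intro fuelm
  induction fuelm with
  | zero =>
    intro i hi hf out
    rw [pyRange_pos_nil i size N (by omega) hN, List.foldl_nil]
    rw [List.drop_eq_nil_of_le (by omega), pvChunks_nil, List.append_nil]
  | succ fuelm IH =>
    intro i hi hf out
    by_cases hib : i < size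
    · rw [pyRange_pos_cons i size N hib hN, List.foldl_cons]
      rw [IH (i + N) (by omega) (by omega)]
      have hsl : PySem.List.slice nums (some i) (some (i + N))
          = (nums.drop i.toNat).take N.toNat := by
        rw [PySem.List.slice_toNat nums hi (by omega)]
        congr 1
        omega
      set l := nums.drop i.toNat with hl
      have hllen : l.length = nums.length - i.toNat := by rw [hl]; simp
      have hlne : l ≠ [] := by
        apply List.ne_nil_of_length_pos
        omega
      have hdd : nums.drop (i + N).toNat = l.drop N.toNat := by
        rw [hl, List.drop_drop]
        congr 1
        omega
      rw [hdd]
      simp only [hsl]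
      rw [List.append_assoc]
      congr 1
      by_cases hfull : N.toNat ≤ l.length
      · have hblen : ((l.take N.toNat).length : Int) = N := by
          simp [List.length_take]
          omega
        rw [if_pos hblen]
        rw [pvChunks_step N.toNat l hlne (by omega) hfull]
      · have htl : l.take N.toNat = l := List.take_of_length_le (by omega)
        rw [htl, if_neg (by omega)]
        rw [List.drop_eq_nil_of_le (by omega), pvChunks_nil, List.append_nil]
        rw [pvChunks_short N.toNat l (by omega)]
    · rw [pyRange_pos_nil i size N (by omega) hN, List.foldl_nil]
      rw [List.drop_eq_nil_of_le (by omega), pvChunks_nil, List.append_nil]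

lemma rev_pyRange : ∀ (n : Nat),
    (PySem.List.pyRange 1 ((n : Int) + 1) 1).reverse = PySem.List.pyRange (n : Int) 0 (-1) := by
  intro n
  induction n with
  | zero =>
    rw [PySem.List.pyRange_one_eq_nil (by omega), PySem.List.pyRange_neg_one_eq_nil (by omega)]
    rfl
  | succ n IH =>
    rw [show ((n + 1 : Nat) : Int) = (n : Int) + 1 by omega]
    rw [PySem.List.pyRange_one_succ_right (by omega : (1 : Int) ≤ (n : Int) + 1)]
    rw [List.reverse_append, List.reverse_singleton]
    rw [PySem.List.pyRange_neg_one_cons (by omega : (0 : Int) < (n : Int) + 1)]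
    rw [show (n : Int) + 1 - 1 = (n : Int) by omega]
    rw [IH]
    rfl

lemma main_pos (size M : Int) (h1 : 1 ≤ M) (hMs : M ≤ size) :
    (if M = 1 then PySem.List.pyRange 1 (size + 1) 1
     else if size = M then PySem.List.pyRange size 0 (-1)
     else pvOuterLoop size M (size.toNat + 1) 0 (PySem.List.pyRange 1 (size + 1) 1))
    = (PySem.List.pyRange 0 ((PySem.List.pyRange 1 (size + 1) 1).length : Int) M).foldl
        (fun out i =>
          out ++
            (if ((PySem.List.slice (PySem.List.pyRange 1 (size + 1) 1) (some i)
                    (some (i + M))).length : Int) = M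
              then (PySem.List.slice (PySem.List.pyRange 1 (size + 1) 1) (some i)
                    (some (i + M))).reverse
              else PySem.List.slice (PySem.List.pyRange 1 (size + 1) 1) (some i)
                    (some (i + M)))) [] := by
  have hpos : 0 < size := by omega
  have hlen : (PySem.List.pyRange 1 (size + 1) 1).length = size.toNat := by
    rw [PySem.List.length_pyRange_one]
    congr 1
    ring
  rw [show ((PySem.List.pyRange 1 (size + 1) 1).length : Int) = size from by rw [hlen]; omega]
  rw [foldB_eq size M (by omega) _ hlen size.toNat 0 (by omega) (by omega) []]
  rw [List.nil_append, show (0 : Int).toNat = 0 from rfl, List.drop_zero]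
  by_cases hM1 : M = 1
  · rw [if_pos hM1, hM1]
    exact (pvChunks_one _).symm
  · rw [if_neg hM1]
    by_cases hsM : size = M
    · rw [if_pos hsM]
      have hne : PySem.List.pyRange 1 (size + 1) 1 ≠ [] := by
        apply List.ne_nil_of_length_pos
        omega
      rw [pvChunks_step M.toNat _ hne (by omega) (by omega)]
      rw [List.take_of_length_le (by omega), List.drop_eq_nil_of_le (by omega),
        pvChunks_nil, List.append_nil]
      obtain ⟨n, hn⟩ := Int.eq_ofNat_of_zero_le (le_of_lt hpos)
      rw [hn]
      exact (rev_pyRange n).symm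
    · rw [if_neg hsM]
      have hMt : 1 ≤ M.toNat := by omega
      rw [outerLoop_eq size M (by omega) (size.toNat + 1) 0 _ (by omega) hlen
        (by
          calc (size - 0).toNat ≤ size.toNat + 1 := by omega
          _ ≤ (size.toNat + 1) * M.toNat := Nat.le_mul_of_pos_right _ (by omega))]
      rw [show (0 : Int).toNat = 0 from rfl, List.take_zero, List.drop_zero, List.nil_append]

lemma main_neg (size M : Int) (hsz : size ≤ 0) (hM1 : M ≠ 1) (hle : size ≤ M) :
    (if M = 1 then PySem.List.pyRange 1 (size + 1) 1
     else if size = M then PySem.List.pyRange size 0 (-1)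
     else pvOuterLoop size M (size.toNat + 1) 0 (PySem.List.pyRange 1 (size + 1) 1))
    = (PySem.List.pyRange 0 ((PySem.List.pyRange 1 (size + 1) 1).length : Int) M).foldl
        (fun out i =>
          out ++
            (if ((PySem.List.slice (PySem.List.pyRange 1 (size + 1) 1) (some i)
                    (some (i + M))).length : Int) = M
              then (PySem.List.slice (PySem.List.pyRange 1 (size + 1) 1) (some i)
                    (some (i + M))).reverse
              else PySem.List.slice (PySem.List.pyRange 1 (size + 1) 1) (some i)
                    (some (i + M)))) [] := by
  have hnums : PySem.List.pyRange 1 (size + 1) 1 = [] :=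
    PySem.List.pyRange_one_eq_nil (by omega)
  rw [if_neg hM1, hnums]
  rw [show (([] : List Int).length : Int) = 0 from rfl,
    show PySem.List.pyRange 0 0 M = [] from by simp [PySem.List.pyRange],
    List.foldl_nil]
  by_cases hsM : size = M
  · rw [if_pos hsM]
    exact PySem.List.pyRange_neg_one_eq_nil (by omega)
  · rw [if_neg hsM]
    rw [show size.toNat = 0 from by omega]
    simp only [pvOuterLoop]
    rw [if_neg (by omega)]

theorem equal_main (size N : Int) (hP : Pre_nth_compartment_rev size N) :
    nth_compartment_rev size N = nth_compartment_rev_alt size N := by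
  obtain ⟨hwrap, hnowrap, hnz⟩ := hP
  simp only [nth_compartment_rev, nth_compartment_rev_alt]
  set M := if size < N then PySem.Int.mod N size else N with hM
  by_cases hw : size < N
  · obtain ⟨hs0, hm0⟩ := hwrap hw
    have hM' : M = PySem.Int.mod N size := by rw [hM, if_pos hw]
    by_cases hpos : 0 < size
    · have hnn := PySem.Int.mod_nonneg N hpos
      have hlt := PySem.Int.mod_lt N hpos
      exact main_pos size M (by omega) (by omega)
    · have hneg : size < 0 := by omega
      have hb := PySem.Int.mod_neg_bounds N hneg
      exact main_neg size M (by omega) (by omega) (by omega)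
  · have hM' : M = N := by rw [hM, if_neg hw]
    rcases hnowrap hw with h1 | hEq
    · exact main_pos size M (by omega) (by omega)
    · by_cases hpos : 0 < size
      · exact main_pos size M (by omega) (by omega)
      · have hN0 : N ≠ 0 := by
          intro h
          exact hnz ⟨by omega, h⟩
        exact main_neg size M (by omega) (by omega) (by omega)

-- ===== VERDICT (by name: the statement is the Claim_ definition above) =====
theorem nth_compartment_rev_spec : Claim_equal_nth_compartment_rev := by
  intro size N _ hP
  exact equal_main size N hP
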